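-- pv_equiv track=rewrite | github.com/sjin09/hapfusion | src/hapmix/haplib.py | get_hapmix_idx
-- ===== SOURCE A (Python) =====
-- from typing import Dict, List, Tuple
--
-- def get_hamming_distance(consensus_h0_lst: List[str], read_hbit_lst: List[str]) -> Tuple[int, int]:
--
--     h0_distance = 0
--     h1_distance = 0
--     for (i, j) in zip(consensus_h0_lst, read_hbit_lst):
--         if j == "-":
--             continue
--         if i != j:
--             h0_distance += 1
--         else:
--             h1_distance += 1
--     return h0_distance, h1_distance
--
-- def get_read_haplotype(consensus_h0_lst: List[str], read_hbit_lst: List[str]) -> str: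
--     h0_distance, h1_distance = get_hamming_distance(consensus_h0_lst, read_hbit_lst)
--     if h0_distance > h1_distance:
--         return "1"
--     elif h0_distance < h1_distance:
--         return "0"
--     elif h0_distance == h1_distance:
--         return "."
--
-- def get_hapmix_idx(consensus_h0_lst, read_hbit_lst):
--     idx_lst = []
--     read_haplotype = get_read_haplotype(consensus_h0_lst, read_hbit_lst)
--     if read_haplotype == "0":
--         for i, (j, k) in enumerate(zip(consensus_h0_lst, read_hbit_lst)):
--             if k == "-":
--                 continue
--             if j != k:
--                 idx_lst.append(i)
--     elif read_haplotype == "1":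
--         for x, (y, z) in enumerate(zip(consensus_h0_lst, read_hbit_lst)):
--             if z == "-":
--                 continue
--             if y == z:
--                 idx_lst.append(x)
--     elif read_haplotype == ".":
--         for i, (j, k) in enumerate(zip(consensus_h0_lst, read_hbit_lst)):
--             if k == "-":
--                 continue
--             if j != k:
--                 idx_lst.append(i)
--     return idx_lst, read_haplotype
-- ===== SOURCE B (Python) =====
-- def get_hapmix_idx(consensus_h0_lst, read_hbit_lst):
--     mismatch_idx = []
--     match_idx = []
--     for i, (c, r) in enumerate(zip(consensus_h0_lst, read_hbit_lst)):
--         if r == "-":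
--             continue
--         if c != r:
--             mismatch_idx.append(i)
--         else:
--             match_idx.append(i)
--     h0_distance = len(mismatch_idx)
--     h1_distance = len(match_idx)
--     if h0_distance > h1_distance:
--         return match_idx, "1"
--     elif h0_distance < h1_distance:
--         return mismatch_idx, "0"
--     else:
--         return mismatch_idx, "."
-- ===== Notes on version B (the rewrite author's own statement) =====
-- stated objective: simpler
-- what changed: One pass over enumerate(zip(...)) collects match and mismatch index lists simultaneously; distances are read off as list lengths, replacing A's three-function design that scans the zipped lists twice (once for distances, once per classification branch).
import Mathlib
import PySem

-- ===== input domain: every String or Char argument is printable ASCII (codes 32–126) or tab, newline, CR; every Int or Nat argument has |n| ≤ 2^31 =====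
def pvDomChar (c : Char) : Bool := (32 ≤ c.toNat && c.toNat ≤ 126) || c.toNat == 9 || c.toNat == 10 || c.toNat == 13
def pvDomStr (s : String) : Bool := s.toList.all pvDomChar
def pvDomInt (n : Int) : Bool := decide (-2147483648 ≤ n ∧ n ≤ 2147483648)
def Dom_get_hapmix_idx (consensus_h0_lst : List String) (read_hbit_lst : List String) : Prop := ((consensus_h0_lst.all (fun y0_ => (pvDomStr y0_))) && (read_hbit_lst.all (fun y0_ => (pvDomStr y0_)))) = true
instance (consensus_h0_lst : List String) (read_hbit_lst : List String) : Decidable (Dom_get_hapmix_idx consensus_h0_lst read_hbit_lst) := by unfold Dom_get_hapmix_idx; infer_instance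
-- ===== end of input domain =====

-- B replaces A's three-function, multi-pass design by one pass that collects the
-- match/mismatch index lists together, classifying from their lengths (objective: simpler).

-- ===== PORT A =====
-- for (i, j) in zip(...): skip '-'; count mismatches/matches
def pvHamming (pairs : List (String × String)) : Int × Int :=
  pairs.foldl
    (fun acc p =>
      if p.2 = "-" then acc
      else if p.1 ≠ p.2 then (acc.1 + 1, acc.2)
      else (acc.1, acc.2 + 1))
    (0, 0)

def pvReadHaplotype (consensus_h0_lst : List String) (read_hbit_lst : List String) : String :=
  let d := pvHamming (consensus_h0_lst.zip read_hbit_lst)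
  if d.1 > d.2 then "1"
  else if d.1 < d.2 then "0"
  else "."

-- enumerate loop collecting indices where j != k (mismatch branch of A)
def pvCollectNe (i : Int) (pairs : List (String × String)) : List Int :=
  match pairs with
  | [] => []
  | (j, k) :: rest =>
    if k = "-" then pvCollectNe (i + 1) rest
    else if j ≠ k then i :: pvCollectNe (i + 1) rest
    else pvCollectNe (i + 1) rest

-- enumerate loop collecting indices where y == z (match branch of A)
def pvCollectEq (i : Int) (pairs : List (String × String)) : List Int :=
  match pairs with
  | [] => []
  | (y, z) :: rest =>
    if z = "-" then pvCollectEq (i + 1) rest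
    else if y = z then i :: pvCollectEq (i + 1) rest
    else pvCollectEq (i + 1) rest

def get_hapmix_idx (consensus_h0_lst : List String) (read_hbit_lst : List String) : List Int × String :=
  let read_haplotype := pvReadHaplotype consensus_h0_lst read_hbit_lst
  let pairs := consensus_h0_lst.zip read_hbit_lst
  if read_haplotype = "0" then (pvCollectNe 0 pairs, read_haplotype)
  else if read_haplotype = "1" then (pvCollectEq 0 pairs, read_haplotype)
  else if read_haplotype = "." then (pvCollectNe 0 pairs, read_haplotype)
  else ([], read_haplotype)

-- ===== PORT B =====
-- one pass: build (mismatch_idx, match_idx) simultaneously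
def pvScan (i : Int) (pairs : List (String × String)) : List Int × List Int :=
  match pairs with
  | [] => ([], [])
  | (c, r) :: rest =>
    let acc := pvScan (i + 1) rest
    if r = "-" then acc
    else if c ≠ r then (i :: acc.1, acc.2)
    else (acc.1, i :: acc.2)

def get_hapmix_idx_alt (consensus_h0_lst : List String) (read_hbit_lst : List String) : List Int × String :=
  let acc := pvScan 0 (consensus_h0_lst.zip read_hbit_lst)
  let h0 : Int := acc.1.length
  let h1 : Int := acc.2.length
  if h0 > h1 then (acc.2, "1")
  else if h0 < h1 then (acc.1, "0")
  else (acc.1, ".")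

-- ===== PRECONDITION & SPEC =====
def Spec_get_hapmix_idx (consensus_h0_lst : List String) (read_hbit_lst : List String) (out : List Int × String) : Prop := out = get_hapmix_idx_alt consensus_h0_lst read_hbit_lst
instance (consensus_h0_lst : List String) (read_hbit_lst : List String) (out : List Int × String) : Decidable (Spec_get_hapmix_idx consensus_h0_lst read_hbit_lst out) := by unfold Spec_get_hapmix_idx; infer_instance

-- ===== CLAIM (what is proved, stated in full; the proofs are below) =====
def Claim_equal_get_hapmix_idx : Prop := ∀ (consensus_h0_lst : List String) (read_hbit_lst : List String), Dom_get_hapmix_idx consensus_h0_lst read_hbit_lst → Spec_get_hapmix_idx consensus_h0_lst read_hbit_lst (get_hapmix_idx consensus_h0_lst read_hbit_lst)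

-- ===== LEMMAS AND PROOFS =====

theorem pvScan_fst (i : Int) (pairs : List (String × String)) :
    (pvScan i pairs).1 = pvCollectNe i pairs := by
  induction pairs generalizing i with
  | nil => rfl
  | cons p rest ih =>
    obtain ⟨c, r⟩ := p
    simp only [pvScan, pvCollectNe]
    split_ifs <;> simp [ih]

theorem pvScan_snd (i : Int) (pairs : List (String × String)) :
    (pvScan i pairs).2 = pvCollectEq i pairs := by
  induction pairs generalizing i with
  | nil => rfl
  | cons p rest ih =>
    obtain ⟨c, r⟩ := p
    simp only [pvScan, pvCollectEq]
    by_cases hd : r = "-"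
    · simp [hd, ih]
    · by_cases he : c = r
      · simp [hd, he, ih]
      · simp [hd, he, ih]

theorem pvHamming_foldl (pairs : List (String × String)) (a b : Int) (i : Int) :
    pairs.foldl
      (fun acc p =>
        if p.2 = "-" then acc
        else if p.1 ≠ p.2 then (acc.1 + 1, acc.2)
        else (acc.1, acc.2 + 1))
      (a, b)
    = (a + (pvCollectNe i pairs).length, b + (pvCollectEq i pairs).length) := by
  induction pairs generalizing a b i with
  | nil => simp [pvCollectNe, pvCollectEq]
  | cons p rest ih =>
    obtain ⟨c, r⟩ := p
    simp only [List.foldl, pvCollectNe, pvCollectEq]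
    by_cases hd : r = "-"
    · rw [if_pos hd, if_pos hd, if_pos hd]
      exact ih a b (i + 1)
    · by_cases he : c = r
      · rw [if_neg hd, if_neg hd, if_neg hd, if_neg (not_not_intro he), if_pos he,
          if_neg (not_not_intro he), ih a (b + 1) (i + 1)]
        simp only [Prod.mk.injEq, List.length_cons]
        constructor <;> push_cast <;> ring
      · rw [if_neg hd, if_neg hd, if_neg hd, if_pos he, if_neg he, if_pos he,
          ih (a + 1) b (i + 1)]
        simp only [Prod.mk.injEq, List.length_cons]
        constructor <;> push_cast <;> ring

theorem pvHamming_scan (pairs : List (String × String)) :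
    pvHamming pairs = (((pvScan 0 pairs).1.length : Int), ((pvScan 0 pairs).2.length : Int)) := by
  unfold pvHamming
  rw [pvHamming_foldl pairs 0 0 0, pvScan_fst, pvScan_snd]
  simp

-- ===== VERDICT (by name: the statement is the Claim_ definition above) =====
theorem get_hapmix_idx_spec : Claim_equal_get_hapmix_idx := by
  intro cs rs _
  show get_hapmix_idx cs rs = get_hapmix_idx_alt cs rs
  unfold get_hapmix_idx get_hapmix_idx_alt pvReadHaplotype
  rw [pvHamming_scan]
  simp only [pvScan_fst, pvScan_snd]
  set pairs := cs.zip rs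
  set h0 : Int := ((pvCollectNe 0 pairs).length : Int)
  set h1 : Int := ((pvCollectEq 0 pairs).length : Int)
  by_cases hgt : h0 > h1
  · simp [hgt]
  · by_cases hlt : h0 < h1
    · simp [hgt, hlt]
    · simp [hgt, hlt]
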